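-- pv_equiv track=rewrite | github.com/msft-mirror-aosp/platform.packages.modules.Wifi | tests/hostsidetests/multidevices/test/direct/integration/wifi_p2p_lib.py | check_service_query_result
-- ===== SOURCE A (Python) =====
-- def check_service_query_result(service_list, expect_service_list):
--   """Check serviceList same as expectServiceList or not.
--
--   Args:
--       service_list: ServiceList which get from query result
--       expect_service_list: ServiceList which hardcode in genExpectTestData
--
--   Returns:
--       True: serviceList  same as expectServiceList
--       False:Exist discrepancy between serviceList and expectServiceList
--   """
--   temp_service_list = service_list.copy()
--   temp_expect_service_list = expect_service_list.copy()
--   for service in service_list.keys():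
--     if service in expect_service_list:
--       del temp_service_list[service]
--       del temp_expect_service_list[service]
--   return not temp_expect_service_list and not temp_service_list
-- ===== SOURCE B (Python) =====
-- def check_service_query_result(service_list, expect_service_list):
--   """Equal key sets: same size plus one forward membership scan (no copies, no deletes)."""
--   if len(service_list) != len(expect_service_list):
--     return False
--   return all(service in expect_service_list for service in service_list)
-- ===== Notes on version B (the rewrite author's own statement) =====
-- stated objective: simpler
-- what changed: Replaces A's delete-until-empty over two mutated dict copies by a non-mutating size check plus a single forward membership scan of service_list against expect_service_list (no copies, no deletions).
import Mathlib
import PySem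

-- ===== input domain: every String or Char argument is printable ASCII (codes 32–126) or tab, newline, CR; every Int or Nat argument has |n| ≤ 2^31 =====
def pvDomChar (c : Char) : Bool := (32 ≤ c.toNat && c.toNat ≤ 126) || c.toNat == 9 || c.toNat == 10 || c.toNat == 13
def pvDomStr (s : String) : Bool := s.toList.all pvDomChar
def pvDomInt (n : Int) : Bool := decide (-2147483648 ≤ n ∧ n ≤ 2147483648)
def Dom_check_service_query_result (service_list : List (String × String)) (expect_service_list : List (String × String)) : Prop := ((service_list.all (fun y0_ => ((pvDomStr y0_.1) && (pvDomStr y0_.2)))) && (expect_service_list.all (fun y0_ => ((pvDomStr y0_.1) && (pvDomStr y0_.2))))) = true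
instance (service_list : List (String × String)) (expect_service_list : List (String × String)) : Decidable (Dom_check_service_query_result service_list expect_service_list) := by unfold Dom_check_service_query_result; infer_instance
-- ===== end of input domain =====

-- B replaces A's delete-until-empty over two mutated dict copies by a non-mutating
-- size check plus one forward membership scan (equal key sets ⇔ equal size + subset).

-- ===== PORT A =====
-- literal port: copy both dicts, iterate over service_list's keys, delete shared keys
-- from both copies, return that both copies ended empty
def check_service_query_result (service_list : List (String × String)) (expect_service_list : List (String × String)) : Bool :=
  let d_sl : PySem.Dict String String := PySem.Dict.mk service_list
  let d_el : PySem.Dict String String := PySem.Dict.mk expect_service_list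
  let st :=
    d_sl.keys.foldl
      (fun (st : PySem.Dict String String × PySem.Dict String String) service =>
        if d_el.contains service then (st.1.erase service, st.2.erase service) else st)
      (d_sl, d_el)
  st.2.items.isEmpty && st.1.items.isEmpty

-- ===== PORT B =====
-- literal port of Source B: length check, then `all(service in expect_service_list for service in service_list)`
def check_service_query_result_alt (service_list : List (String × String)) (expect_service_list : List (String × String)) : Bool :=
  if service_list.length ≠ expect_service_list.length then false
  else service_list.all (fun p => (PySem.Dict.mk expect_service_list).contains p.1)

-- ===== PRECONDITION & SPEC =====
-- Both parameters are Python dicts; an association list with duplicate keys does not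
-- represent any dict input A can receive, so Pre_ requires the key lists to be duplicate-free.
def Pre_check_service_query_result (service_list : List (String × String)) (expect_service_list : List (String × String)) : Prop :=
  (service_list.map Prod.fst).Nodup ∧ (expect_service_list.map Prod.fst).Nodup
instance (service_list : List (String × String)) (expect_service_list : List (String × String)) : Decidable (Pre_check_service_query_result service_list expect_service_list) := by unfold Pre_check_service_query_result; infer_instance

def pvWitness_check_service_query_result : (List (String × String)) × (List (String × String)) :=
  ([("a", "1"), ("b", "2")], [("b", "2"), ("a", "1")])

def Spec_check_service_query_result (service_list : List (String × String)) (expect_service_list : List (String × String)) (out : Bool) : Prop := out = check_service_query_result_alt service_list expect_service_list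
instance (service_list : List (String × String)) (expect_service_list : List (String × String)) (out : Bool) : Decidable (Spec_check_service_query_result service_list expect_service_list out) := by unfold Spec_check_service_query_result; infer_instance

-- ===== CLAIM (what is proved, stated in full; the proofs are below) =====
def Claim_equal_check_service_query_result : Prop := ∀ (service_list : List (String × String)) (expect_service_list : List (String × String)), Dom_check_service_query_result service_list expect_service_list → Pre_check_service_query_result service_list expect_service_list → Spec_check_service_query_result service_list expect_service_list (check_service_query_result service_list expect_service_list)

-- ===== LEMMAS AND PROOFS =====

-- the erase loop of A is a filter of both dicts' item lists
lemma foldl_erase_pair (ks : List String) (c : String → Bool)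
    (d e : PySem.Dict String String) :
    (ks.foldl
      (fun (st : PySem.Dict String String × PySem.Dict String String) k =>
        if c k then (st.1.erase k, st.2.erase k) else st) (d, e)) =
    (PySem.Dict.mk (d.items.filter (fun p => !(ks.any (fun k => c k && p.1 == k)))),
     PySem.Dict.mk (e.items.filter (fun p => !(ks.any (fun k => c k && p.1 == k))))) := by
  induction ks generalizing d e with
  | nil =>
      simp only [List.foldl_nil, List.any_nil, Bool.not_false, List.filter_true]
  | cons k ks ih =>
      simp only [List.foldl_cons]
      by_cases hc : c k = true
      · rw [if_pos hc, ih]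
        unfold PySem.Dict.erase
        simp only [List.filter_filter]
        have hp : (fun (a : String × String) => (!ks.any fun k => c k && a.1 == k) && !(a.1 == k))
            = (fun p => !(k :: ks).any fun k => c k && p.1 == k) := by
          funext p
          cases hks : ks.any fun k2 => c k2 && p.1 == k2 <;>
            cases hk : p.1 == k <;> simp [hc, hks, hk]
        rw [hp]
      · have hb : c k = false := by revert hc; cases c k <;> simp
        rw [if_neg hc, ih]
        have hp : (fun (p : String × String) => !ks.any fun k => c k && p.1 == k)
            = (fun p => !(k :: ks).any fun k => c k && p.1 == k) := by
          funext p; simp [hb]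
        rw [hp]
      -- placeholder
-- A's loop result, read off: both leftovers empty ⇔ mutual key containment
lemma a_eq_filters (sl el : List (String × String)) :
    check_service_query_result sl el =
      ((el.filter (fun p => !(sl.any (fun q => q.1 == p.1)))).isEmpty &&
       (sl.filter (fun p => !(el.any (fun q => q.1 == p.1)))).isEmpty) := by
  have h := foldl_erase_pair (sl.map Prod.fst) (fun k => (PySem.Dict.mk el).contains k)
    (PySem.Dict.mk sl) (PySem.Dict.mk el)
  simp only [check_service_query_result]
  rw [show (PySem.Dict.mk sl).keys = sl.map Prod.fst from rfl, h]
  congr 1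
  · apply congrArg; apply List.filter_congr; intro p hp
    apply congrArg
    rw [Bool.eq_iff_iff]
    simp only [List.any_eq_true, List.mem_map, PySem.Dict.contains,
      Bool.and_eq_true, beq_iff_eq]
    constructor
    · rintro ⟨k, ⟨q, hq, rfl⟩, ⟨r, hr, hrk⟩, hpk⟩
      exact ⟨q, hq, hpk.symm⟩
    · rintro ⟨q, hq, hq1⟩
      exact ⟨q.1, ⟨q, hq, rfl⟩, ⟨p, hp, hq1.symm⟩, hq1.symm⟩
  · apply congrArg; apply List.filter_congr; intro p hp
    apply congrArg
    rw [Bool.eq_iff_iff]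
    simp only [List.any_eq_true, List.mem_map, PySem.Dict.contains,
      Bool.and_eq_true, beq_iff_eq]
    constructor
    · rintro ⟨k, ⟨q, hq, rfl⟩, ⟨r, hr, hrk⟩, hpk⟩
      exact ⟨r, hr, hrk.trans hpk.symm⟩
    · rintro ⟨q, hq, hq1⟩
      exact ⟨p.1, ⟨p, hp, rfl⟩, ⟨q, hq, hq1⟩, rfl⟩

-- on Nodup lists, a subset of equal length is mutually containing and vice versa
lemma subset_len_iff {K E : List String} (hK : K.Nodup) (hE : E.Nodup) (hKE : K ⊆ E) :
    (E ⊆ K ↔ K.length = E.length) := by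
  constructor
  · intro hEK
    exact le_antisymm (hK.subperm hKE).length_le (hE.subperm hEK).length_le
  · intro hlen
    exact ((hK.subperm hKE).perm_of_length_le (by omega)).symm.subset

theorem check_service_query_result_spec : Claim_equal_check_service_query_result := by
  intro sl el _ hpre
  obtain ⟨hK, hE⟩ := hpre
  unfold Spec_check_service_query_result
  rw [a_eq_filters]
  unfold check_service_query_result_alt
  rw [Bool.eq_iff_iff]
  have hL : (((el.filter fun p => !(sl.any fun q => q.1 == p.1)).isEmpty &&
      (sl.filter fun p => !(el.any fun q => q.1 == p.1)).isEmpty) = true) ↔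
      ((∀ p ∈ el, ∃ q ∈ sl, q.1 = p.1) ∧ (∀ p ∈ sl, ∃ q ∈ el, q.1 = p.1)) := by
    simp [List.isEmpty_iff, List.filter_eq_nil_iff]
  have hR : ((if sl.length ≠ el.length then false
      else sl.all fun p => (PySem.Dict.mk el).contains p.1) = true) ↔
      (sl.length = el.length ∧ ∀ p ∈ sl, ∃ q ∈ el, q.1 = p.1) := by
    split_ifs with h
    · exact iff_of_false (by simp) (fun hc => h hc.1)
    · simp only [PySem.Dict.contains, List.all_eq_true, List.any_eq_true,
        beq_iff_eq]
      exact ⟨fun ha => ⟨not_not.mp h, ha⟩, fun hc => hc.2⟩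
  rw [hL, hR]
  have hsubK : (∀ p ∈ sl, ∃ q ∈ el, q.1 = p.1) ↔ sl.map Prod.fst ⊆ el.map Prod.fst := by
    simp only [List.subset_def, List.mem_map]
    constructor
    · rintro h k ⟨p, hp, rfl⟩
      obtain ⟨q, hq, hq1⟩ := h p hp
      exact ⟨q, hq, hq1⟩
    · intro h p hp
      obtain ⟨q, hq, hq1⟩ := h ⟨p, hp, rfl⟩
      exact ⟨q, hq, hq1⟩
  have hsubE : (∀ p ∈ el, ∃ q ∈ sl, q.1 = p.1) ↔ el.map Prod.fst ⊆ sl.map Prod.fst := by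
    simp only [List.subset_def, List.mem_map]
    constructor
    · rintro h k ⟨p, hp, rfl⟩
      obtain ⟨q, hq, hq1⟩ := h p hp
      exact ⟨q, hq, hq1⟩
    · intro h p hp
      obtain ⟨q, hq, hq1⟩ := h ⟨p, hp, rfl⟩
      exact ⟨q, hq, hq1⟩
  have hlenK : (sl.map Prod.fst).length = sl.length := List.length_map ..
  have hlenE : (el.map Prod.fst).length = el.length := List.length_map ..
  constructor
  · rintro ⟨h1, h2⟩
    have hKE := hsubK.mp h2
    have hEK := hsubE.mp h1
    have := (subset_len_iff hK hE hKE).mp hEK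
    exact ⟨by omega, h2⟩
  · rintro ⟨hlen, h2⟩
    have hKE := hsubK.mp h2
    have hEK := (subset_len_iff hK hE hKE).mpr (by omega)
    exact ⟨hsubE.mpr hEK, h2⟩
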